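-- pv_equiv track=rewrite | github.com/githubpsyche/proquest-scraper | reference_scrapeArticles.py | xof
-- ===== SOURCE A (Python) =====
-- import itertools
--
-- proximityparam = 200    # required proximacy of query terms to one another
--
-- def xof(x, options, location):
--     # filters blank options and wraps them in parentheses
--     options = ['(' + each + ')' for each in options if len(each) > 0]
--
--     # sets x to minimum of number of options and specified maximum limit
--     x = min(len(options), x)
--
--     # builds set of possible ways to fulfill constraints
--     result = []
--     for xcombo in itertools.combinations(options, x):
--         constraints = ['{1} NEAR/{0} {2}'.format(proximityparam, *list(nearcombo))
--                        for nearcombo in itertools.combinations(list(xcombo) + [location], 2)]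
--         result.append(' AND '.join(constraints))
--
--     return '((' + ') OR ('.join(result) + '))'
-- ===== SOURCE B (Python) =====
-- proximityparam = 200    # required proximacy of query terms to one another
--
-- def xof(x, options, location):
--     # filters blank options and wraps them in parentheses
--     opts = ['(' + each + ')' for each in options if len(each) > 0]
--     k = min(len(opts), x)
--
--     def go(k, items):
--         # Fused recursion: each way to choose k of items (keeping their order)
--         # together with its clause constraints, built as the choice is made:
--         # picking `a` ahead of `chosen` contributes `a NEAR b` for each later
--         # pick b, then `a NEAR location`.
--         if k == 0:
--             return [([], [])]
--         if not items:
--             return []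
--         a, rest = items[0], items[1:]
--         with_a = []
--         for chosen, parts in go(k - 1, rest):
--             pre = ['{1} NEAR/{0} {2}'.format(proximityparam, a, c) for c in chosen]
--             pre.append('{1} NEAR/{0} {2}'.format(proximityparam, a, location))
--             with_a.append(([a] + chosen, pre + parts))
--         return with_a + go(k, rest)
--
--     clauses = [' AND '.join(parts) for _, parts in go(k, opts)]
--     return '((' + ') OR ('.join(clauses) + '))'
-- ===== Notes on version B (the rewrite author's own statement) =====
-- stated objective: alternative
-- what changed: B drops itertools entirely: one recursive function fuses subset generation with clause construction, emitting each element's NEAR-constraints (against the later picks and the location) at the moment the element is chosen, instead of enumerating combinations and then re-pairing each combo with combinations(combo+[location],2).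
-- crash fix: On x < 0 A raises ValueError (itertools.combinations with negative r) while B's recursion finds no subsets and returns '(())'. — e.g. on xof(-1, ["a"], "L"): A raises ValueError, B returns "(())"
import Mathlib
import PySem

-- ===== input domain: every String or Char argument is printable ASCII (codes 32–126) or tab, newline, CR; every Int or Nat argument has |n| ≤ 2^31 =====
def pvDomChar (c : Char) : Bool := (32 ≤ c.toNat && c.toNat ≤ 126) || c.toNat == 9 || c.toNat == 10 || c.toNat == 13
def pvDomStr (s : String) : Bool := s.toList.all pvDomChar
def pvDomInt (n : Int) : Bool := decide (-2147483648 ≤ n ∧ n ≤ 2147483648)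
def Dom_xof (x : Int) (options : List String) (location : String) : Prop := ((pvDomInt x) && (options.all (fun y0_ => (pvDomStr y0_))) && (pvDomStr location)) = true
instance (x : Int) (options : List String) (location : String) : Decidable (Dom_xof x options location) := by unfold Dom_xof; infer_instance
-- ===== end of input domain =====

-- B replaces itertools (combinations + per-combo re-pairing) with one recursion that
-- fuses subset choice and clause construction (objective: alternative, same cost).

def proximityparam : Int := 200

-- '{1} NEAR/{0} {2}'.format(proximityparam, a, b) — the pair-string format both Pythons share
def pvNear (a b : String) : String := a ++ " NEAR/" ++ PySem.Int.toStr proximityparam ++ " " ++ b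

-- ===== PORT A =====
-- itertools.combinations(l, n) in itertools' lexicographic order
def pvCombinations : Nat → List String → List (List String)
  | 0, _ => [[]]
  | _ + 1, [] => []
  | n + 1, a :: as => ((pvCombinations n as).map (a :: ·)) ++ pvCombinations (n + 1) as

def xof (x : Int) (options : List String) (location : String) : String :=
  let opts := (options.filter (fun each => decide (0 < PySem.Str.len each))).map
    (fun each => "(" ++ each ++ ")")
  let x' : Int := min ((opts.length : Int)) x
  -- Pre_xof gives 0 ≤ x, so x' = x'.toNat; Python raises ValueError for negative x
  let result := (pvCombinations x'.toNat opts).map (fun xcombo =>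
    PySem.Str.join " AND " ((pvCombinations 2 (xcombo ++ [location])).map (fun nearcombo =>
      match nearcombo with
      | [a, b] => pvNear a b
      | _ => "")))
  "((" ++ PySem.Str.join ") OR (" result ++ "))"

-- ===== PORT B =====
-- B's inner `go`: each k-subset of items (in order) paired with its constraint list,
-- built as the choice is made; k stays an Int as in Source B (k < 0 never hits the k = 0 base)
def pvGo (location : String) (k : Int) : List String → List (List String × List String)
  | [] => if k = 0 then [([], [])] else []
  | a :: rest =>
      if k = 0 then [([], [])]
      else
        ((pvGo location (k - 1) rest).map (fun cp =>
          (a :: cp.1, (cp.1.map (fun c => pvNear a c) ++ [pvNear a location]) ++ cp.2))) ++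
        pvGo location k rest

def xof_alt (x : Int) (options : List String) (location : String) : String :=
  let opts := (options.filter (fun each => decide (0 < PySem.Str.len each))).map
    (fun each => "(" ++ each ++ ")")
  let k : Int := min ((opts.length : Int)) x
  let clauses := (pvGo location k opts).map (fun cp => PySem.Str.join " AND " cp.2)
  "((" ++ PySem.Str.join ") OR (" clauses ++ "))"

-- ===== PRECONDITION & SPEC =====
-- Pre_ excludes negative x, on which Python A raises ValueError (itertools.combinations).
def Pre_xof (x : Int) (options : List String) (location : String) : Prop := 0 ≤ x
instance (x : Int) (options : List String) (location : String) : Decidable (Pre_xof x options location) := by unfold Pre_xof; infer_instance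
def pvWitness_xof : Int × List String × String := (2, ["alpha", "beta"], "Lancaster")

-- On x < 0 A raises ValueError (combinations with negative r) while B returns '(())'.
def Raises_xof (x : Int) (options : List String) (location : String) : Prop := x < 0
instance (x : Int) (options : List String) (location : String) : Decidable (Raises_xof x options location) := by unfold Raises_xof; infer_instance
def pvRaiseWitness_xof : Int × List String × String := (-1, ["a"], "L")
def pvRaiseWitnessOut_xof : String := "(())"

def Spec_xof (x : Int) (options : List String) (location : String) (out : String) : Prop := out = xof_alt x options location
instance (x : Int) (options : List String) (location : String) (out : String) : Decidable (Spec_xof x options location out) := by unfold Spec_xof; infer_instance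

-- ===== CLAIM (what is proved, stated in full; the proofs are below) =====
def Claim_equal_xof : Prop := ∀ (x : Int) (options : List String) (location : String), Dom_xof x options location → Pre_xof x options location → Spec_xof x options location (xof x options location)
def Claim_raises_xof : Prop := (∀ (x : Int) (options : List String) (location : String), Dom_xof x options location → Raises_xof x options location → ¬ Pre_xof x options location) ∧ (Dom_xof (pvRaiseWitness_xof.1) (pvRaiseWitness_xof.2.1) (pvRaiseWitness_xof.2.2) ∧ Raises_xof (pvRaiseWitness_xof.1) (pvRaiseWitness_xof.2.1) (pvRaiseWitness_xof.2.2) ∧ xof_alt (pvRaiseWitness_xof.1) (pvRaiseWitness_xof.2.1) (pvRaiseWitness_xof.2.2) = pvRaiseWitnessOut_xof)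

-- ===== LEMMAS AND PROOFS =====

-- the clause-constraint list B builds for a chosen combo
def pvPartsOf (location : String) : List String → List String
  | [] => []
  | a :: t => t.map (fun c => pvNear a c) ++ [pvNear a location] ++ pvPartsOf location t

-- B's fused recursion = A's combinations, each paired with its constraint list
theorem pvGo_eq (location : String) (k : Nat) (items : List String) :
    pvGo location (k : Int) items
      = (pvCombinations k items).map (fun c => (c, pvPartsOf location c)) := by
  induction items generalizing k with
  | nil =>
      cases k with
      | zero => simp [pvGo, pvCombinations, pvPartsOf]
      | succ n =>
          have hne : ((n + 1 : Nat) : Int) ≠ 0 := by exact_mod_cast Nat.succ_ne_zero n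
          simp only [pvGo, pvCombinations, List.map_nil]
          rw [if_neg hne]
  | cons a rest ih =>
      cases k with
      | zero => simp [pvGo, pvCombinations, pvPartsOf]
      | succ n =>
          have hne : ((n + 1 : Nat) : Int) ≠ 0 := by exact_mod_cast Nat.succ_ne_zero n
          have hk : ((n + 1 : Nat) : Int) - 1 = (n : Int) := by push_cast; ring
          simp only [pvGo, pvCombinations]
          rw [if_neg hne, hk, ih, ih, List.map_append, List.map_map, List.map_map]
          congr 1

-- combinations of size 1 are the singletons
theorem pvComb_one (l : List String) : pvCombinations 1 l = l.map (fun b => [b]) := by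
  induction l with
  | nil => rfl
  | cons a as ih => simp [pvCombinations, ih]

-- combinations of size 2 of a cons
theorem pvComb_two_cons (a : String) (l : List String) :
    pvCombinations 2 (a :: l) = (l.map fun b => [a, b]) ++ pvCombinations 2 l := by
  show ((pvCombinations 1 l).map (a :: ·)) ++ _ = _
  rw [pvComb_one, List.map_map]
  rfl

-- A's pair enumeration over combo + [location] yields exactly B's constraint list
theorem pvPairs_eq (location : String) (c : List String) :
    (pvCombinations 2 (c ++ [location])).map (fun nearcombo =>
      match nearcombo with
      | [a, b] => pvNear a b
      | _ => "") = pvPartsOf location c := by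
  induction c with
  | nil => rfl
  | cons a t ih =>
      rw [show (a :: t) ++ [location] = a :: (t ++ [location]) from rfl,
        pvComb_two_cons, List.map_append, ih, List.map_append]
      simp [pvPartsOf, List.map_map, List.append_assoc]

-- ===== VERDICT (by name: the statement is the Claim_ definition above) =====
theorem xof_spec : Claim_equal_xof := by
  intro x options location _ hx
  unfold Spec_xof xof xof_alt
  refine congrArg (fun L => "((" ++ PySem.Str.join ") OR (" L ++ "))") ?_
  set opts := (options.filter (fun each => decide (0 < PySem.Str.len each))).map
    (fun each => "(" ++ each ++ ")") with hopts
  have hmin : (0 : Int) ≤ min ((opts.length : Int)) x := le_min (by positivity) hx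
  have hcast : min ((opts.length : Int)) x = ((min ((opts.length : Int)) x).toNat : Int) :=
    (Int.toNat_of_nonneg hmin).symm
  rw [hcast, pvGo_eq, List.map_map]
  apply List.map_congr_left
  intro c _
  exact congrArg (PySem.Str.join " AND ") (pvPairs_eq location c)

@[simp] theorem xof_raises : Claim_raises_xof := by
  unfold Claim_raises_xof
  exact ⟨fun x _ _ _ h => by unfold Raises_xof at h; unfold Pre_xof; omega, by decide⟩
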